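-- pv_equiv track=rewrite | github.com/jhyeonjung97/verve | .ipynb_checkpoints/comb-checkpoint.py | has_no_neighbor_duplicates
-- ===== SOURCE A (Python) =====
-- def has_no_neighbor_duplicates(comb):
--     neighbors = [
--         (0, 1), (0, 2), (0, 4),
--         (1, 3), (1, 5),
--         (2, 3), (2, 6),
--         (3, 7),
--         (4, 5), (4, 6),
--         (5, 7),
--         (6, 7)
--     ]
--     return all(comb[i] != comb[j] for i, j in neighbors)
-- ===== SOURCE B (Python) =====
-- def has_no_neighbor_duplicates(comb):
--     # Group the cube's vertices by value incrementally; the labelling is clash-free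
--     # iff no vertex's value class already holds a cube neighbor of it, i.e. an
--     # earlier vertex whose index differs in exactly one bit (Hamming distance 1).
--     groups = {}
--     for i in range(8):
--         v = comb[i]
--         if any(bin(i ^ j).count('1') == 1 for j in groups.get(v, [])):
--             return False
--         groups.setdefault(v, []).append(i)
--     return True
-- ===== Notes on version B (the rewrite author's own statement) =====
-- stated objective: alternative
-- what changed: Instead of scanning A's hardcoded 12-edge table, B makes one incremental pass over the 8 vertices, grouping them by value in a dict and returning False as soon as a vertex's value class already contains a cube neighbor (an earlier index at Hamming distance 1); B also returns early on some short inputs where A raises.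
import Mathlib
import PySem

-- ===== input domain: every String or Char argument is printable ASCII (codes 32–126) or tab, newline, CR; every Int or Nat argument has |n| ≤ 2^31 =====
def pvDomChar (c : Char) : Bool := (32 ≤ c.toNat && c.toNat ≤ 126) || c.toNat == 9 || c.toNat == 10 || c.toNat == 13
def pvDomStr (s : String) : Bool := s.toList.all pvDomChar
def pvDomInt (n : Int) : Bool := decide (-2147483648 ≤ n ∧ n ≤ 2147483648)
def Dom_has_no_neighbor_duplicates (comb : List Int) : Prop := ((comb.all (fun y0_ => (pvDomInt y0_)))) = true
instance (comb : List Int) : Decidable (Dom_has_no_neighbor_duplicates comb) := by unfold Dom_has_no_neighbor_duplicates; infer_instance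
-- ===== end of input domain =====

-- B replaces A's hardcoded 12-edge scan by a different algorithm: one incremental pass over the
-- 8 vertices grouping them by value in a dict, failing when a vertex's value class already holds
-- a cube neighbor (index at Hamming distance 1); equivalence is proved on Pre_ (where A returns).


-- ===== PORT A =====
-- A's hardcoded edge table
def pvEdges : List (Int × Int) :=
  [(0, 1), (0, 2), (0, 4), (1, 3), (1, 5), (2, 3), (2, 6), (3, 7), (4, 5), (4, 6), (5, 7), (6, 7)]

-- all(comb[i] != comb[j] for i, j in neighbors): short-circuit recursion; none = IndexError
def pvAllNeA (comb : List Int) : List (Int × Int) → Option Bool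
  | [] => some true
  | (i, j) :: rest =>
    match PySem.List.pyGet? comb i, PySem.List.pyGet? comb j with
    | some a, some b => if a ≠ b then pvAllNeA comb rest else some false
    | _, _ => none

def has_no_neighbor_duplicates (comb : List Int) : Bool :=
  (pvAllNeA comb pvEdges).getD false

-- ===== PORT B =====
-- bin(i ^ j).count('1') == 1  (PySem.Int.bitCount reads |n|, matching bin(n).count('1'))
def pvAdjacent (i j : Int) : Bool := PySem.Int.bitCount (PySem.Int.bxor i j) == 1

-- Source B's loop: for i in range(8): v = comb[i]; if any(adjacent to group of v): return False;
-- groups.setdefault(v, []).append(i).  none = IndexError at comb[i]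
def pvLoopB (comb : List Int) (groups : PySem.Dict Int (List Int)) : List Int → Option Bool
  | [] => some true
  | i :: rest =>
    match PySem.List.pyGet? comb i with
    | none => none
    | some v =>
      if (groups.getD v []).any (fun j => pvAdjacent i j) then some false
      else pvLoopB comb (groups.modify v [] (· ++ [i])) rest

def has_no_neighbor_duplicates_alt (comb : List Int) : Bool :=
  (pvLoopB comb PySem.Dict.empty (PySem.List.pyRange 0 8 1)).getD false

-- ===== PRECONDITION & SPEC =====
-- Pre_ = exactly the inputs where A returns (len ≥ 8, or an equal in-range edge is reached
-- before any edge whose index is out of range); elsewhere A raises IndexError.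
def Pre_has_no_neighbor_duplicates (comb : List Int) : Prop :=
  8 ≤ comb.length ∨
    ((List.range 12).any (fun k =>
      ((pvEdges.take (k + 1)).all (fun e => decide (e.2 < (comb.length : Int)))) &&
      match pvEdges[k]? with
      | some (i, j) => PySem.List.pyGet? comb i == PySem.List.pyGet? comb j
      | none => false)) = true
instance (comb : List Int) : Decidable (Pre_has_no_neighbor_duplicates comb) := by
  unfold Pre_has_no_neighbor_duplicates; infer_instance

def pvWitness_has_no_neighbor_duplicates : List Int := [0, 1, 2, 3, 4, 5, 6, 7]

def Spec_has_no_neighbor_duplicates (comb : List Int) (out : Bool) : Prop := out = has_no_neighbor_duplicates_alt comb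
instance (comb : List Int) (out : Bool) : Decidable (Spec_has_no_neighbor_duplicates comb out) := by unfold Spec_has_no_neighbor_duplicates; infer_instance

-- ===== CLAIM (what is proved, stated in full; the proofs are below) =====
def Claim_equal_has_no_neighbor_duplicates : Prop := ∀ (comb : List Int), Dom_has_no_neighbor_duplicates comb → Pre_has_no_neighbor_duplicates comb → Spec_has_no_neighbor_duplicates comb (has_no_neighbor_duplicates comb)

-- ===== LEMMAS AND PROOFS =====

def pvBad (comb : List Int) (a b : Nat) : Prop :=
  a < b ∧ b < comb.length ∧ b < 8 ∧ comb[a]? = comb[b]? ∧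
    PySem.Int.bitCount (PySem.Int.bxor (a : Int) (b : Int)) = 1

def pvGrpL (comb : List Int) (m : Nat) (c : Int) : List Int :=
  (List.range m).filterMap (fun (j : Nat) => if comb[j]? = some c then some ((j : Int)) else none)

theorem pv_edge_props : ∀ e ∈ pvEdges,
    0 ≤ e.1 ∧ e.1 < e.2 ∧ e.2 < 8 ∧ PySem.Int.bitCount (PySem.Int.bxor e.1 e.2) = 1 := by decide

theorem pv_edge_complete : ∀ b : Nat, b < 8 → ∀ a : Nat, a < b →
    PySem.Int.bitCount (PySem.Int.bxor (a : Int) (b : Int)) = 1 →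
    ((a : Int), (b : Int)) ∈ pvEdges := by
  intro b hb a ha
  interval_cases b <;> interval_cases a <;> decide

theorem pvAllNeA_true_iff (comb : List Int) (es : List (Int × Int)) :
    (pvAllNeA comb es).getD false = true ↔
      ∀ e ∈ es, ∃ a b, PySem.List.pyGet? comb e.1 = some a ∧
        PySem.List.pyGet? comb e.2 = some b ∧ a ≠ b := by
  induction es with
  | nil => simp [pvAllNeA]
  | cons e rest ih =>
    obtain ⟨i, j⟩ := e
    cases hgi : PySem.List.pyGet? comb i with
    | none => simp [pvAllNeA, hgi]
    | some a =>
      cases hgj : PySem.List.pyGet? comb j with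
      | none => simp [pvAllNeA, hgi, hgj]
      | some b =>
        by_cases hab : a = b
        · simp [pvAllNeA, hgi, hgj, hab]
        · simp only [pvAllNeA, hgi, hgj, if_pos hab, List.forall_mem_cons]
          rw [ih]
          constructor
          · intro h
            exact ⟨⟨a, b, rfl, rfl, hab⟩, h⟩
          · intro h
            exact h.2

-- A returns True exactly on clash-free full labellings
theorem pvA_true_iff (comb : List Int) :
    has_no_neighbor_duplicates comb = true ↔
      8 ≤ comb.length ∧ ∀ a b, ¬ pvBad comb a b := by
  unfold has_no_neighbor_duplicates
  rw [pvAllNeA_true_iff]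
  constructor
  · intro hA
    have hlen : 8 ≤ comb.length := by
      obtain ⟨x, y, _, hgy, _⟩ := hA (6, 7) (by decide)
      have h7 : PySem.List.pyGet? comb 7 = comb[(7 : Nat)]? := by
        simpa using PySem.List.pyGet?_of_nonneg comb (by norm_num : (0:Int) ≤ 7)
      rw [h7] at hgy
      obtain ⟨hlt, -⟩ := List.getElem?_eq_some_iff.1 hgy
      omega
    refine ⟨hlen, ?_⟩
    rintro a b ⟨hab, hblen, hb8, heq, hham⟩
    obtain ⟨x, y, hgx, hgy, hne⟩ := hA _ (pv_edge_complete b hb8 a hab hham)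
    have halen : a < comb.length := lt_trans hab hblen
    rw [PySem.List.pyGet?_natCast, List.getElem?_eq_getElem halen] at hgx
    rw [PySem.List.pyGet?_natCast, List.getElem?_eq_getElem hblen] at hgy
    rw [List.getElem?_eq_getElem halen, List.getElem?_eq_getElem hblen, Option.some_inj] at heq
    exact hne ((Option.some_inj.1 hgx).symm.trans (heq.trans (Option.some_inj.1 hgy)))
  · rintro ⟨hlen, hnb⟩ e he
    obtain ⟨h0, hlt, h8, hham⟩ := pv_edge_props e he
    have h02 : (0:Int) ≤ e.2 := le_of_lt (lt_of_le_of_lt h0 hlt)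
    have hilen : e.1.toNat < comb.length := by omega
    have hjlen : e.2.toNat < comb.length := by omega
    refine ⟨comb[e.1.toNat], comb[e.2.toNat], ?_, ?_, ?_⟩
    · exact PySem.List.pyGet?_eq_some_getElem comb h0 (by omega)
    · exact PySem.List.pyGet?_eq_some_getElem comb h02 (by omega)
    · intro hvals
      apply hnb e.1.toNat e.2.toNat
      refine ⟨by omega, hjlen, by omega, ?_, ?_⟩
      · rw [List.getElem?_eq_getElem hilen, List.getElem?_eq_getElem hjlen, hvals]
      · rw [Int.toNat_of_nonneg h0, Int.toNat_of_nonneg h02]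
        exact hham

-- Pre_'s short-input disjunct supplies a clash
theorem pv_pre_short_bad (comb : List Int)
    (hpre : Pre_has_no_neighbor_duplicates comb) (hlen : ¬ 8 ≤ comb.length) :
    ∃ a b, pvBad comb a b := by
  have hany := hpre.resolve_left hlen
  simp only [List.any_eq_true, List.mem_range] at hany
  obtain ⟨k, hk12, hf⟩ := hany
  have hklen : k < pvEdges.length := by simp [pvEdges]; omega
  rw [List.getElem?_eq_getElem hklen] at hf
  rw [Bool.and_eq_true] at hf
  obtain ⟨hall, hmatch⟩ := hf
  set e := pvEdges[k] with hedef
  have he : e ∈ pvEdges := List.getElem_mem hklen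
  obtain ⟨h0, hlt, h8, hham⟩ := pv_edge_props e he
  have hmem_take : e ∈ pvEdges.take (k + 1) := by
    rw [hedef]
    exact List.mem_take_iff_getElem.2 ⟨k, lt_min_iff.2 ⟨by omega, hklen⟩, rfl⟩
  have he2 : e.2 < (comb.length : Int) := by
    have := List.all_eq_true.1 hall _ hmem_take
    simpa using this
  have h02 : (0:Int) ≤ e.2 := le_of_lt (lt_of_le_of_lt h0 hlt)
  have hjlen : e.2.toNat < comb.length := by omega
  have hilen : e.1.toNat < comb.length := by omega
  have hgeq : PySem.List.pyGet? comb e.1 = PySem.List.pyGet? comb e.2 := by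
    obtain ⟨i, j⟩ := e
    exact eq_of_beq hmatch
  refine ⟨e.1.toNat, e.2.toNat, by omega, hjlen, by omega, ?_, ?_⟩
  · rw [PySem.List.pyGet?_eq_some_getElem comb h0 (by omega),
      PySem.List.pyGet?_eq_some_getElem comb h02 (by omega)] at hgeq
    rw [List.getElem?_eq_getElem hilen, List.getElem?_eq_getElem hjlen,
      Option.some_inj.1 hgeq]
  · rw [Int.toNat_of_nonneg h0, Int.toNat_of_nonneg h02]
    exact hham

-- the loop invariant: the dict maps each value to the (increasing) indices seen so far holding it
def pvInv (comb : List Int) (m : Nat) (d : PySem.Dict Int (List Int)) : Prop :=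
  ∀ c, d.getD c [] = pvGrpL comb m c

theorem pv_mem_grpL (comb : List Int) (m : Nat) (c : Int) (x : Int) :
    x ∈ pvGrpL comb m c ↔ ∃ a, a < m ∧ comb[a]? = some c ∧ x = (a : Int) := by
  unfold pvGrpL
  simp only [List.mem_filterMap, List.mem_range]
  constructor
  · rintro ⟨a, ha, hx⟩
    by_cases h : comb[a]? = some c
    · rw [if_pos h, Option.some_inj] at hx
      exact ⟨a, ha, h, hx.symm⟩
    · rw [if_neg h] at hx
      cases hx
  · rintro ⟨a, ha, h, rfl⟩
    exact ⟨a, ha, by rw [if_pos h]⟩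

theorem pv_fire_iff (comb : List Int) (m : Nat) (d : PySem.Dict Int (List Int))
    (hd : pvInv comb m d) (v : Int) :
    ((d.getD v []).any (fun j => pvAdjacent (m : Int) j) = true) ↔
      ∃ a, a < m ∧ comb[a]? = some v ∧
        PySem.Int.bitCount (PySem.Int.bxor (a : Int) (m : Int)) = 1 := by
  rw [hd, List.any_eq_true]
  constructor
  · rintro ⟨x, hx, hadj⟩
    obtain ⟨a, ha, hc, rfl⟩ := (pv_mem_grpL comb m v x).1 hx
    refine ⟨a, ha, hc, ?_⟩
    rw [pvAdjacent, beq_iff_eq, PySem.Int.bxor_comm] at hadj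
    exact hadj
  · rintro ⟨a, ha, hc, hadj⟩
    refine ⟨(a : Int), (pv_mem_grpL comb m v _).2 ⟨a, ha, hc, rfl⟩, ?_⟩
    rw [pvAdjacent, beq_iff_eq, PySem.Int.bxor_comm]
    exact hadj

theorem pv_inv_step (comb : List Int) (m : Nat) (d : PySem.Dict Int (List Int))
    (hd : pvInv comb m d) (v : Int) (hv : comb[m]? = some v) :
    pvInv comb (m + 1) (d.modify v [] (· ++ [(m : Int)])) := by
  intro c
  rw [PySem.Dict.getD_modify]
  unfold pvGrpL
  rw [List.range_succ, List.filterMap_append]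
  by_cases hcv : c = v
  · subst hcv
    rw [if_pos rfl, hd c]
    simp [pvGrpL, hv]
  · rw [if_neg hcv, hd c]
    have : comb[m]? ≠ some c := by rw [hv]; simpa using fun h => hcv h.symm
    simp [pvGrpL, this]

theorem pv_range_cons (m : Nat) (hm : m < 8) :
    PySem.List.pyRange (m : Int) 8 1 = (m : Int) :: PySem.List.pyRange ((m + 1 : Nat) : Int) 8 1 := by
  rw [PySem.List.pyRange_one_cons (by exact_mod_cast hm)]
  norm_num

theorem pvLoopB_false (comb : List Int) :
    ∀ (k m : Nat) (d : PySem.Dict Int (List Int)), m + k = 8 → pvInv comb m d →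
      (∃ a b, pvBad comb a b ∧ m ≤ b) →
      pvLoopB comb d (PySem.List.pyRange (m : Int) 8 1) = some false := by
  intro k
  induction k with
  | zero =>
    rintro m d hmk _ ⟨a, b, ⟨_, _, hb8, _, _⟩, hmb⟩
    omega
  | succ k ih =>
    rintro m d hmk hd ⟨a, b, hbad, hmb⟩
    obtain ⟨hab, hblen, hb8, heq, hham⟩ := hbad
    have hm8 : m < 8 := by omega
    have hmlen : m < comb.length := by omega
    rw [pv_range_cons m hm8]
    show pvLoopB comb d ((m : Int) :: _) = some false
    rw [pvLoopB]
    rw [PySem.List.pyGet?_natCast, List.getElem?_eq_getElem hmlen]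
    by_cases hfire : ((d.getD comb[m] []).any (fun j => pvAdjacent (m : Int) j) = true)
    · simp only [hfire, if_true]
    · simp only [Bool.not_eq_true] at hfire
      simp only [hfire, Bool.false_eq_true, if_false]
      apply ih (m + 1) _ (by omega) (pv_inv_step comb m d hd _ (List.getElem?_eq_getElem hmlen))
      refine ⟨a, b, ⟨hab, hblen, hb8, heq, hham⟩, ?_⟩
      rcases Nat.lt_or_ge m b with h | h
      · omega
      · exfalso
        have hbm : b = m := by omega
        subst hbm
        have : ((d.getD comb[b] []).any (fun j => pvAdjacent (b : Int) j) = true) :=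
          (pv_fire_iff comb b d hd _).2 ⟨a, hab, by rw [heq, List.getElem?_eq_getElem hblen], hham⟩
        rw [hfire] at this
        cases this

theorem pvLoopB_true (comb : List Int) (hlen : 8 ≤ comb.length)
    (hnb : ∀ a b, ¬ pvBad comb a b) :
    ∀ (k m : Nat) (d : PySem.Dict Int (List Int)), m + k = 8 → pvInv comb m d →
      pvLoopB comb d (PySem.List.pyRange (m : Int) 8 1) = some true := by
  intro k
  induction k with
  | zero =>
    intro m d hmk _
    have : m = 8 := by omega
    subst this
    rw [PySem.List.pyRange_one_eq_nil (by norm_num)]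
    rfl
  | succ k ih =>
    intro m d hmk hd
    have hm8 : m < 8 := by omega
    have hmlen : m < comb.length := by omega
    rw [pv_range_cons m hm8]
    rw [pvLoopB]
    rw [PySem.List.pyGet?_natCast, List.getElem?_eq_getElem hmlen]
    by_cases hfire : ((d.getD comb[m] []).any (fun j => pvAdjacent (m : Int) j) = true)
    · exfalso
      obtain ⟨a, ha, hc, hham⟩ := (pv_fire_iff comb m d hd _).1 hfire
      exact hnb a m ⟨ha, hmlen, hm8, by rw [hc, List.getElem?_eq_getElem hmlen], hham⟩
    · simp only [Bool.not_eq_true] at hfire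
      simp only [hfire, Bool.false_eq_true, if_false]
      exact ih (m + 1) _ (by omega) (pv_inv_step comb m d hd _ (List.getElem?_eq_getElem hmlen))

theorem pv_inv_zero (comb : List Int) : pvInv comb 0 PySem.Dict.empty := by
  intro c
  rw [PySem.Dict.getD_empty]
  rfl

theorem pv_final (comb : List Int) (hpre : Pre_has_no_neighbor_duplicates comb) :
    has_no_neighbor_duplicates comb = has_no_neighbor_duplicates_alt comb := by
  unfold has_no_neighbor_duplicates_alt
  by_cases hbad : ∃ a b, pvBad comb a b
  · obtain ⟨a0, b0, hb⟩ := hbad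
    have hA : has_no_neighbor_duplicates comb = false := by
      rw [Bool.eq_false_iff]
      intro h
      exact ((pvA_true_iff comb).1 h).2 a0 b0 hb
    have hB := pvLoopB_false comb 8 0 PySem.Dict.empty (by omega) (pv_inv_zero comb)
      ⟨a0, b0, hb, Nat.zero_le _⟩
    norm_num at hB
    rw [hA, hB]
    rfl
  · push Not at hbad
    by_cases hlen : 8 ≤ comb.length
    · have hB := pvLoopB_true comb hlen hbad 8 0 PySem.Dict.empty (by omega) (pv_inv_zero comb)
      norm_num at hB
      rw [(pvA_true_iff comb).2 ⟨hlen, hbad⟩, hB]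
      rfl
    · exact absurd (pv_pre_short_bad comb hpre hlen)
        (by rintro ⟨a, b, hb⟩; exact hbad a b hb)

-- ===== VERDICT (by name: the statement is the Claim_ definition above) =====
theorem has_no_neighbor_duplicates_spec : Claim_equal_has_no_neighbor_duplicates := by
  intro comb _ hpre
  unfold Spec_has_no_neighbor_duplicates
  exact pv_final comb hpre
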